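-- pv_equiv track=rewrite | github.com/kimia88/project | main.py | smart_shorten_title
-- ===== SOURCE A (Python) =====
-- def smart_shorten_title(title):
--     if len(title) <= 60:
--         return title
--     words = title.split()
--     short_title = ""
--     for word in words:
--         if len(short_title) + len(word) + 1 <= 57:
--             short_title += word + " "
--         else:
--             break
--     return short_title.strip() + "..."
-- ===== SOURCE B (Python) =====
-- def smart_shorten_title(title):
--     if len(title) <= 60:
--         return title
--     words = title.split()
--     sums = []
--     total = 0
--     for w in words:
--         total += len(w) + 1
--         sums.append(total)
--     k = 0
--     while k < len(sums) and sums[k] <= 57: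
--         k += 1
--     return " ".join(words[:k]) + "..."
-- ===== Notes on version B (the rewrite author's own statement) =====
-- stated objective: alternative
-- what changed: Replaces the growing-string greedy loop (append word plus space, re-measure the string each iteration) by a prefix-sum table of len(word)+1, a scan counting how many leading words keep the running total within the limit, and a single space-join over that word prefix.
import Mathlib
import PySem

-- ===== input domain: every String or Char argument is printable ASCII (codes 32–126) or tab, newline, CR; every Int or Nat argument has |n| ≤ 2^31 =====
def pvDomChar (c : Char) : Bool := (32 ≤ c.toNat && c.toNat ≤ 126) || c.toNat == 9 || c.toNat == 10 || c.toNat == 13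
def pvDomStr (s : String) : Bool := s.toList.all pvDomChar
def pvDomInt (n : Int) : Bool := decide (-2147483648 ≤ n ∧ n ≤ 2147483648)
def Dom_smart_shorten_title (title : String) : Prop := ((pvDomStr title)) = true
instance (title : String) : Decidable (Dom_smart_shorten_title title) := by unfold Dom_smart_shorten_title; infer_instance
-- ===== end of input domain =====

-- B replaces A's growing-string greedy loop by a prefix-sum table over len(word)+1,
-- a count of leading sums ≤ 57, and one join over that word prefix (objective: alternative).


-- ===== PORT A =====
-- the for-loop with break: acc is short_title; break returns the accumulator
def pvALoop : List (List Char) → List Char → List Char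
  | [], acc => acc
  | w :: ws, acc =>
    if (acc.length : Int) + w.length + 1 ≤ 57 then pvALoop ws (acc ++ w ++ [' '])
    else acc

def smart_shorten_title (title : String) : String :=
  if PySem.Str.len title ≤ 60 then title
  else
    let words := PySem.Chars.split₀ title.toList
    let short_title := pvALoop words []
    String.ofList (PySem.Chars.strip short_title ++ ['.', '.', '.'])

-- ===== PORT B =====
-- the sums-building for-loop of Source B
def pvBSums : List (List Char) → Int → List Int
  | [], _ => []
  | w :: ws, total => (total + w.length + 1) :: pvBSums ws (total + w.length + 1)

-- the 'while k < len(sums) and sums[k] <= 57: k += 1' loop: k counted structurally along sums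
def pvBCount : List Int → Nat
  | [] => 0
  | s :: rest => if s ≤ 57 then pvBCount rest + 1 else 0

def smart_shorten_title_alt (title : String) : String :=
  if PySem.Str.len title ≤ 60 then title
  else
    let words := PySem.Chars.split₀ title.toList
    let sums := pvBSums words 0
    let k := pvBCount sums
    String.ofList (PySem.Chars.join [' '] (PySem.List.slice words none (some (k : Int))) ++ ['.', '.', '.'])

-- ===== PRECONDITION & SPEC =====
def Spec_smart_shorten_title (title : String) (out : String) : Prop := out = smart_shorten_title_alt title
instance (title : String) (out : String) : Decidable (Spec_smart_shorten_title title out) := by unfold Spec_smart_shorten_title; infer_instance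

-- ===== CLAIM (what is proved, stated in full; the proofs are below) =====
def Claim_equal_smart_shorten_title : Prop := ∀ (title : String), Dom_smart_shorten_title title → Spec_smart_shorten_title title (smart_shorten_title title)

-- ===== LEMMAS AND PROOFS =====

-- proof-side greedy selection of words, tracking the running Int length
def pvGreedy : List (List Char) → Int → List (List Char)
  | [], _ => []
  | w :: ws, c =>
    if c + w.length + 1 ≤ 57 then w :: pvGreedy ws (c + w.length + 1) else []

-- proof-side space-join
def pvSJ : List (List Char) → List Char
  | [] => []
  | [t] => t
  | t :: ts => t ++ ' ' :: pvSJ ts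

theorem pvALoop_eq (ws : List (List Char)) : ∀ acc : List Char,
    pvALoop ws acc = acc ++ (pvGreedy ws (acc.length : Int)).flatMap (· ++ [' ']) := by
  induction ws with
  | nil => intro acc; simp [pvALoop, pvGreedy]
  | cons w ws ih =>
    intro acc
    simp only [pvALoop, pvGreedy]
    by_cases h : (acc.length : Int) + w.length + 1 ≤ 57
    · rw [if_pos h, if_pos h, ih]
      simp [List.flatMap_cons]
      ring_nf
    · rw [if_neg h, if_neg h]; simp

theorem pvGreedy_eq_take (ws : List (List Char)) : ∀ c : Int,
    pvGreedy ws c = ws.take (pvBCount (pvBSums ws c)) := by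
  induction ws with
  | nil => intro c; simp [pvGreedy, pvBSums, pvBCount]
  | cons w ws ih =>
    intro c
    simp only [pvGreedy, pvBSums, pvBCount]
    by_cases h : c + w.length + 1 ≤ 57
    · rw [if_pos h, if_pos h, ih]; rfl
    · rw [if_neg h, if_neg h]; rfl

-- every word produced by split₀ is nonempty and whitespace-free
theorem pvSplit₀_go_words (s : List Char) : ∀ (cur : List Char) (acc : List (List Char)),
    (∀ c ∈ cur, PySem.Chars.isspace c = false) →
    (∀ w ∈ acc, w ≠ [] ∧ ∀ c ∈ w, PySem.Chars.isspace c = false) →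
    ∀ w ∈ PySem.Chars.split₀.go s cur acc, w ≠ [] ∧ ∀ c ∈ w, PySem.Chars.isspace c = false := by
  induction s with
  | nil =>
    intro cur acc hcur hacc w hw
    simp only [PySem.Chars.split₀.go] at hw
    split at hw
    · exact hacc w (by simpa using hw)
    · rename_i hne
      simp only [List.mem_reverse, List.mem_cons] at hw
      rcases hw with h | h
      · subst h
        refine ⟨by simpa using hne, ?_⟩
        intro c hc; exact hcur c (by simpa using hc)
      · exact hacc w h
  | cons c rest ih =>
    intro cur acc hcur hacc w hw
    simp only [PySem.Chars.split₀.go] at hw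
    split at hw
    · split at hw
      · exact ih [] acc (by simp) hacc w hw
      · rename_i hsp hne
        refine ih [] (cur.reverse :: acc) (by simp) ?_ w hw
        intro v hv
        rcases List.mem_cons.mp hv with h | h
        · subst h
          exact ⟨by simpa using hne, fun d hd => hcur d (by simpa using hd)⟩
        · exact hacc v h
    · rename_i hsp
      refine ih (c :: cur) acc ?_ hacc w hw
      intro d hd
      rcases List.mem_cons.mp hd with h | h
      · subst h; simpa using hsp
      · exact hcur d h

theorem pvSplit₀_words (s : List Char) :
    ∀ w ∈ PySem.Chars.split₀ s, w ≠ [] ∧ ∀ c ∈ w, PySem.Chars.isspace c = false := by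
  exact pvSplit₀_go_words s [] [] (by simp) (by simp)

theorem pvSJ_append_last (us : List (List Char)) (w : List Char) :
    pvSJ (us ++ [w]) = us.flatMap (· ++ [' ']) ++ w := by
  induction us with
  | nil => simp [pvSJ]
  | cons u us ih =>
    cases us with
    | nil => simp [pvSJ]
    | cons v vs =>
      rw [show pvSJ (u :: v :: vs ++ [w]) = u ++ ' ' :: pvSJ (v :: vs ++ [w]) from rfl, ih]
      simp [List.flatMap_cons]

theorem pvJoin_eq_sj (ts : List (List Char)) : PySem.Chars.join [' '] ts = pvSJ ts := by
  induction ts with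
  | nil => simp [PySem.Chars.join, List.intercalate, pvSJ]
  | cons t ts ih =>
    cases ts with
    | nil => simp [PySem.Chars.join, List.intercalate, pvSJ, List.intersperse]
    | cons v vs =>
      simp only [PySem.Chars.join, List.intercalate, List.intersperse] at ih ⊢
      simp only [pvSJ, ← ih]
      simp

theorem pvStrip_flat (ts : List (List Char))
    (h : ∀ w ∈ ts, w ≠ [] ∧ ∀ c ∈ w, PySem.Chars.isspace c = false) :
    PySem.Chars.strip (ts.flatMap (· ++ [' '])) = pvSJ ts := by
  cases ts with
  | nil => simp [PySem.Chars.strip, PySem.Chars.lstrip, PySem.Chars.rstrip, pvSJ]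
  | cons t ts =>
    obtain ⟨ht, htc⟩ := h t (by simp)
    -- lstrip is the identity: the first char is the head of t, a non-space
    have hl : PySem.Chars.lstrip ((t :: ts).flatMap (· ++ [' '])) = (t :: ts).flatMap (· ++ [' ']) := by
      cases t with
      | nil => exact absurd rfl ht
      | cons c t' =>
        have : PySem.Chars.isspace c = false := htc c (by simp)
        simp [PySem.Chars.lstrip, List.flatMap_cons, this]
    -- rstrip on the reversed list
    rw [PySem.Chars.strip, hl, PySem.Chars.rstrip, List.reverse_flatMap]
    have hrev : (t :: ts).reverse ≠ [] := by simp
    obtain ⟨w0, rest0, hw0⟩ := List.exists_cons_of_ne_nil hrev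
    obtain ⟨hw0ne, hw0c⟩ : w0 ≠ [] ∧ ∀ c ∈ w0, PySem.Chars.isspace c = false := by
      refine h w0 ?_
      have hmem : w0 ∈ (t :: ts).reverse := by rw [hw0]; simp
      rw [List.mem_reverse] at hmem; exact hmem
    have hdrop : List.dropWhile PySem.Chars.isspace
        (List.flatMap (List.reverse ∘ (· ++ [' '])) (w0 :: rest0))
        = w0.reverse ++ rest0.flatMap (List.reverse ∘ (· ++ [' '])) := by
      cases hw : w0.reverse with
      | nil => exact absurd (by simpa using hw) hw0ne
      | cons d wr =>
        have hd : PySem.Chars.isspace d = false := by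
          apply hw0c
          have : d ∈ w0.reverse := by rw [hw]; simp
          simpa using this
        simp [List.flatMap_cons, Function.comp, List.dropWhile_cons, PySem.Chars.isspace, hw]
        have : PySem.Chars.isspace d = false := hd
        simp [PySem.Chars.isspace] at this
        omega
    rw [hw0, hdrop]
    have hts : t :: ts = rest0.reverse ++ [w0] := by
      have := congrArg List.reverse hw0
      simpa using this
    rw [hts, pvSJ_append_last]
    rw [List.reverse_append, List.reverse_reverse, List.reverse_flatMap]
    simp [Function.comp_def]

-- ===== VERDICT (by name: the statement is the Claim_ definition above) =====
theorem smart_shorten_title_spec : Claim_equal_smart_shorten_title := by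
  intro title _
  unfold Spec_smart_shorten_title smart_shorten_title smart_shorten_title_alt
  by_cases h : PySem.Str.len title ≤ 60
  · rw [if_pos h, if_pos h]
  · rw [if_neg h, if_neg h]
    have hwords := pvSplit₀_words title.toList
    show String.ofList (PySem.Chars.strip (pvALoop (PySem.Chars.split₀ title.toList) []) ++ ['.', '.', '.'])
      = String.ofList (PySem.Chars.join [' ']
          (PySem.List.slice (PySem.Chars.split₀ title.toList) none
            (some ((pvBCount (pvBSums (PySem.Chars.split₀ title.toList) 0) : Nat) : Int))) ++ ['.', '.', '.'])
    rw [pvALoop_eq]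
    simp only [List.nil_append, List.length_nil, Nat.cast_zero]
    rw [pvGreedy_eq_take]
    rw [PySem.List.slice_to_natCast, pvJoin_eq_sj]
    rw [pvStrip_flat]
    intro w hmem
    exact hwords w (List.mem_of_mem_take hmem)
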